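-- pv_equiv track=rewrite | github.com/samargunners/Dunkin-sales-summary | scripts/compile_store_reports.py | prefer_sheets_for_category
-- ===== SOURCE A (Python) =====
-- import unicodedata
--
-- def norm(s: str) -> str:
--     if s is None: return ""
--     return unicodedata.normalize("NFKC", str(s)).replace("\u00A0"," ").replace("\u2011","-").strip()
--
-- PREFER_KEYS = {
--     "sales_summary": ["menu","mix","metrics","sales mix"],
--     "sales_by_daypart": ["daypart","part"],
--     "sales_by_subcategory": ["subcategory","subcat"],
--     "tender_type_metrics": ["tender","tender type"],
--     "labor_metrics": ["labor","hours","metrics"],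
--     "sales_by_order_type": ["order type","order"],
--     "sales_mix_detail": ["sales mix detail","mix detail","item"],
-- }
--
-- def prefer_sheets_for_category(sheetnames, category):
--     keys = PREFER_KEYS.get(category, [])
--     scored = []
--     for s in sheetnames:
--         sn = norm(s).lower()
--         scored.append((1 if any(k in sn for k in keys) else 0, s))
--     scored.sort(key=lambda x: -x[0])
--     return [s for _, s in scored] or list(sheetnames)
-- ===== SOURCE B (Python) =====
-- import unicodedata
--
-- def norm(s: str) -> str:
--     if s is None: return ""
--     return unicodedata.normalize("NFKC", str(s)).replace("\u00A0"," ").replace("\u2011","-").strip()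
--
-- PREFER_KEYS = {
--     "sales_summary": ["menu","mix","metrics","sales mix"],
--     "sales_by_daypart": ["daypart","part"],
--     "sales_by_subcategory": ["subcategory","subcat"],
--     "tender_type_metrics": ["tender","tender type"],
--     "labor_metrics": ["labor","hours","metrics"],
--     "sales_by_order_type": ["order type","order"],
--     "sales_mix_detail": ["sales mix detail","mix detail","item"],
-- }
--
-- def prefer_sheets_for_category(sheetnames, category):
--     keys = PREFER_KEYS.get(category, [])
--     matched, other = [], []
--     for s in sheetnames:
--         sn = norm(s).lower()
--         (matched if any(k in sn for k in keys) else other).append(s)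
--     return (matched + other) or list(sheetnames)
-- ===== Notes on version B (the rewrite author's own statement) =====
-- stated objective: simpler
-- what changed: Replaces the score-tuple list plus stable sort by -score with a single-pass stable two-bucket partition (matched ++ other), exploiting that scores are only 0/1.
import Mathlib
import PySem

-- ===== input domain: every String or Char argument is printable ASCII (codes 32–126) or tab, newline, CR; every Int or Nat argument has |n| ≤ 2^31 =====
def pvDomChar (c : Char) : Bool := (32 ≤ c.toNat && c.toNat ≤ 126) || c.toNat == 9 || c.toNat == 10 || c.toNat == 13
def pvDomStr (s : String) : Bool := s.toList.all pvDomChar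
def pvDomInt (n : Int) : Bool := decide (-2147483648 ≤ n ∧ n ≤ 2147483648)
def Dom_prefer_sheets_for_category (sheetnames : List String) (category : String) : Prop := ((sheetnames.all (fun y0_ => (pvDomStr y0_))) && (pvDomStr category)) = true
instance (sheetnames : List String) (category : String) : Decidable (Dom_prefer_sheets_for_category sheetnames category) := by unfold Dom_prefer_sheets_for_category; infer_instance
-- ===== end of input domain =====

-- B replaces A's score-list-and-stable-sort with one stable partition pass (matched bucket ++ other bucket); objective: simpler, same result.

-- ===== PORT A =====
-- norm: on the printable-ASCII domain, NFKC normalization and the U+00A0/U+2011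
-- replacements are the identity, so norm(s) reduces exactly to s.strip().
def pvNorm (s : String) : String := PySem.Str.strip s

-- PREFER_KEYS, a module-level dict literal (shared by both ports, as in Python)
def pvPreferKeys : PySem.Dict String (List String) := PySem.Dict.ofList
  [ ("sales_summary", ["menu","mix","metrics","sales mix"]),
    ("sales_by_daypart", ["daypart","part"]),
    ("sales_by_subcategory", ["subcategory","subcat"]),
    ("tender_type_metrics", ["tender","tender type"]),
    ("labor_metrics", ["labor","hours","metrics"]),
    ("sales_by_order_type", ["order type","order"]),
    ("sales_mix_detail", ["sales mix detail","mix detail","item"]) ]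

def prefer_sheets_for_category (sheetnames : List String) (category : String) : List String :=
  let keys := pvPreferKeys.getD category []
  let scored := sheetnames.foldl (fun acc s =>
      acc ++ [((if keys.any (fun k => PySem.Str.isIn k (PySem.Str.lower (pvNorm s))) then (1:Int) else 0), s)]) []
  let scored := PySem.List.sorted scored (fun x => -x.1) false
  let res := scored.map (fun p => p.2)
  if res = [] then sheetnames else res

-- ===== PORT B =====
def prefer_sheets_for_category_alt (sheetnames : List String) (category : String) : List String :=
  let keys := pvPreferKeys.getD category []
  let buckets := sheetnames.foldl (fun (b : List String × List String) s =>
      if keys.any (fun k => PySem.Str.isIn k (PySem.Str.lower (pvNorm s))) then (b.1 ++ [s], b.2)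
      else (b.1, b.2 ++ [s])) ([], [])
  let res := buckets.1 ++ buckets.2
  if res = [] then sheetnames else res

-- ===== PRECONDITION & SPEC =====
def Spec_prefer_sheets_for_category (sheetnames : List String) (category : String) (out : List String) : Prop := out = prefer_sheets_for_category_alt sheetnames category
instance (sheetnames : List String) (category : String) (out : List String) : Decidable (Spec_prefer_sheets_for_category sheetnames category out) := by unfold Spec_prefer_sheets_for_category; infer_instance

-- ===== CLAIM (what is proved, stated in full; the proofs are below) =====
def Claim_equal_prefer_sheets_for_category : Prop := ∀ (sheetnames : List String) (category : String), Dom_prefer_sheets_for_category sheetnames category → Spec_prefer_sheets_for_category sheetnames category (prefer_sheets_for_category sheetnames category)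

-- ===== LEMMAS AND PROOFS =====

-- one unfolding step of PySem.List.insertBy on a cons (definitional)
theorem pvInsStep (bef : Int × String → Int × String → Bool) (x y : Int × String) (t : List (Int × String)) :
    PySem.List.insertBy bef x (y :: t)
      = if bef x y = true then x :: y :: t else y :: PySem.List.insertBy bef x t := rfl

-- inserting a matched (score-1) pair into "all-1 block ++ all-0 block" puts it between the blocks
theorem pvInsA (x : Int × String) (hx : x.1 = 1) :
    ∀ (m o : List (Int × String)), (∀ p ∈ m, p.1 = 1) → (∀ p ∈ o, p.1 = 0) →
    PySem.List.insertBy (fun a b => decide (-a.1 < -b.1)) x (m ++ o) = m ++ x :: o := by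
  intro m
  induction m with
  | nil =>
    intro o _ ho
    cases o with
    | nil => rfl
    | cons y ys =>
      have hy := ho y (by simp)
      rw [List.nil_append, pvInsStep, if_pos (by rw [hx, hy]; decide)]
      rfl
  | cons z m ih =>
    intro o hm ho
    have hz := hm z (by simp)
    rw [List.cons_append, pvInsStep, if_neg (by rw [hx, hz]; decide),
        ih o (fun p hp => hm p (by simp [hp])) ho, List.cons_append]

-- inserting an unmatched (score-0) pair into a list of score-0/1 pairs appends it at the end
theorem pvInsO (x : Int × String) (hx : x.1 = 0) :
    ∀ (l : List (Int × String)), (∀ p ∈ l, p.1 = 1 ∨ p.1 = 0) →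
    PySem.List.insertBy (fun a b => decide (-a.1 < -b.1)) x l = l ++ [x] := by
  intro l
  induction l with
  | nil => intro _; rfl
  | cons y ys ih =>
    intro h
    have hy := h y (by simp)
    have hno : ¬ ((fun (a b : Int × String) => decide (-a.1 < -b.1)) x y = true) := by
      rcases hy with hy | hy <;> simp [hx, hy]
    rw [pvInsStep, if_neg hno, ih (fun p hp => h p (by simp [hp])), List.cons_append]

-- the insertion-sort loop of A, run over scored pairs, keeps the "ones ++ zeros" shape
theorem pvLoop (f : String → Bool) :
    ∀ (l : List String) (m o : List (Int × String)),
      (∀ p ∈ m, p.1 = 1) → (∀ p ∈ o, p.1 = 0) →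
      l.foldl (fun acc s =>
          PySem.List.insertBy (fun a b => decide (-a.1 < -b.1)) ((if f s then (1:Int) else 0), s) acc) (m ++ o)
        = (m ++ (l.filter f).map (fun s => ((1:Int), s)))
          ++ (o ++ (l.filter (fun s => !f s)).map (fun s => ((0:Int), s))) := by
  intro l
  induction l with
  | nil => intro m o _ _; simp
  | cons s l ih =>
    intro m o hm ho
    rw [List.foldl_cons]
    by_cases hf : f s
    · have h1 : PySem.List.insertBy (fun a b => decide (-a.1 < -b.1)) ((if f s then (1:Int) else 0), s) (m ++ o)
          = (m ++ [((1:Int), s)]) ++ o := by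
        rw [if_pos hf, pvInsA ((1:Int), s) rfl m o hm ho, List.append_assoc, List.singleton_append]
      have hm' : ∀ p ∈ m ++ [((1:Int), s)], p.1 = 1 := by
        intro p hp
        rcases List.mem_append.mp hp with hp | hp
        · exact hm p hp
        · simp at hp; simp [hp]
      rw [h1, ih (m ++ [((1:Int), s)]) o hm' ho]
      simp [hf]
    · have hall : ∀ p ∈ m ++ o, p.1 = 1 ∨ p.1 = 0 := by
        intro p hp
        rcases List.mem_append.mp hp with hp | hp
        · exact Or.inl (hm p hp)
        · exact Or.inr (ho p hp)
      have h1 : PySem.List.insertBy (fun a b => decide (-a.1 < -b.1)) ((if f s then (1:Int) else 0), s) (m ++ o)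
          = m ++ (o ++ [((0:Int), s)]) := by
        rw [if_neg hf, pvInsO ((0:Int), s) rfl (m ++ o) hall, List.append_assoc]
      have ho' : ∀ p ∈ o ++ [((0:Int), s)], p.1 = 0 := by
        intro p hp
        rcases List.mem_append.mp hp with hp | hp
        · exact ho p hp
        · simp at hp; simp [hp]
      rw [h1, ih m (o ++ [((0:Int), s)]) hm ho']
      simp [hf]

-- B's partition loop computes (filter f, filter (not ∘ f)), accumulators generalized
theorem pvPart (f : String → Bool) :
    ∀ (l : List String) (m o : List String),
      l.foldl (fun (b : List String × List String) s =>
          if f s then (b.1 ++ [s], b.2) else (b.1, b.2 ++ [s])) (m, o)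
        = (m ++ l.filter f, o ++ l.filter (fun s => !f s)) := by
  intro l
  induction l with
  | nil => intro m o; simp
  | cons s l ih =>
    intro m o
    by_cases hf : f s <;> simp [hf, ih]

-- both cores compute matched ++ unmatched, in input order
theorem pvMain (f : String → Bool) (l : List String) :
    (PySem.List.sorted (l.foldl (fun acc s => acc ++ [((if f s then (1:Int) else 0), s)]) []) (fun x => -x.1) false).map (fun p => p.2)
      = (l.foldl (fun (b : List String × List String) s =>
            if f s then (b.1 ++ [s], b.2) else (b.1, b.2 ++ [s])) ([], [])).1
        ++ (l.foldl (fun (b : List String × List String) s =>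
            if f s then (b.1 ++ [s], b.2) else (b.1, b.2 ++ [s])) ([], [])).2 := by
  rw [pvPart f l [] []]
  have hA : l.foldl (fun acc s => acc ++ [((if f s then (1:Int) else 0), s)]) []
      = l.map (fun s => ((if f s then (1:Int) else 0), s)) := by
    simpa using PySem.List.foldl_append_singleton_eq_map (fun s => ((if f s then (1:Int) else 0), s)) l []
  rw [hA]
  have hsort : PySem.List.sorted (l.map (fun s => ((if f s then (1:Int) else 0), s))) (fun x => -x.1) false
      = (l.filter f).map (fun s => ((1:Int), s)) ++ (l.filter (fun s => !f s)).map (fun s => ((0:Int), s)) := by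
    show (l.map (fun s => ((if f s then (1:Int) else 0), s))).foldl
        (fun acc x => PySem.List.insertBy (fun a b => decide (-a.1 < -b.1)) x acc) [] = _
    rw [List.foldl_map]
    simpa using pvLoop f l [] [] (by simp) (by simp)
  rw [hsort]
  simp

-- ===== VERDICT (by name: the statement is the Claim_ definition above) =====
theorem prefer_sheets_for_category_spec : Claim_equal_prefer_sheets_for_category := by
  intro l c _
  unfold Spec_prefer_sheets_for_category prefer_sheets_for_category prefer_sheets_for_category_alt
  have h := pvMain (fun s => (pvPreferKeys.getD c []).any (fun k => PySem.Str.isIn k (PySem.Str.lower (pvNorm s)))) l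
  beta_reduce at h
  simp only []
  rw [h]
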